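-- pv_equiv track=rewrite | github.com/tbohne/AoC | 2022/d1.py | solve
-- ===== SOURCE A (Python) =====
-- from typing import Tuple
--
-- def solve(data: list) -> Tuple[int, int]:
--     elves = [[]]
--     for calories in data:
--         if calories:
--             elves[-1].append(int(calories))
--         else:
--             elves.append([])
--     return max([sum(i) for i in elves]), sum(sorted(sum(i) for i in elves)[::-1][:3])
-- ===== SOURCE B (Python) =====
-- def _push(top, v):
--     """Insert v into the descending list top and keep only the 3 largest."""
--     i = 0
--     while i < len(top) and top[i] >= v:
--         i += 1
--     return (top[:i] + [v] + top[i:])[:3]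
--
-- def solve(data):
--     top = []   # up to 3 largest elf totals, descending
--     acc = 0    # running total of the current elf
--     for calories in data:
--         if calories:
--             acc += int(calories)
--         else:
--             top = _push(top, acc)
--             acc = 0
--     top = _push(top, acc)
--     return top[0], sum(top)
-- ===== Notes on version B (the rewrite author's own statement) =====
-- stated objective: alternative
-- what changed: B replaces A's list-of-lists grouping plus two sum passes and a full sort/reverse/slice by a single pass that keeps a running per-elf total and a bounded (at most 3 elements) descending list of the largest totals, from which both answers are read off.
import Mathlib
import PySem

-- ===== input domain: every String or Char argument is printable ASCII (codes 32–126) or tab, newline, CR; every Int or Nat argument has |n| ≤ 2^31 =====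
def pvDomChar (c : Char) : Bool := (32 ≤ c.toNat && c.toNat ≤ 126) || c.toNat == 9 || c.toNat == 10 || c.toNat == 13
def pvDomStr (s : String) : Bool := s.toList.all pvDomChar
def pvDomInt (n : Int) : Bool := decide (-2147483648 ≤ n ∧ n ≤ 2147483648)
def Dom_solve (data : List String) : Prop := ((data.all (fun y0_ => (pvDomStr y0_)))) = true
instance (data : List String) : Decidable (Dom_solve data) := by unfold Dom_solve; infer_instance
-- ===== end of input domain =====

-- B replaces A's list-of-lists + sort/reverse/slice by a single pass keeping a running
-- per-elf total and a bounded (≤ 3 elements) descending list of the largest totals (objective: alternative).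

-- ===== PORT A =====
-- loop body of A's for-loop (elves[-1].append(int(calories)) / elves.append([]))
def stepA (es : List (List Int)) (c : String) : List (List Int) :=
  if c ≠ "" then es.dropLast ++ [(es.getLastD []) ++ [(PySem.Int.ofStr? c).getD 0]]
  else es ++ [[]]

def solve (data : List String) : Int × Int :=
  let elves : List (List Int) := data.foldl stepA [[]]
  let sums : List Int := elves.map (fun i => i.sum)
  ((PySem.List.max? sums (fun x => x)).getD 0,
   (PySem.List.slice ((PySem.List.slice? (PySem.List.sorted sums (fun x => x) false) none none (-1)).getD [])
      none (some 3)).sum)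

-- ===== PORT B =====
-- _push: scan for the insertion point in the descending list, insert, keep the first 3
def insertDesc : List Int → Int → List Int
  | [], v => [v]
  | x :: t, v => if v ≤ x then x :: insertDesc t v else v :: x :: t

def pushTop (top : List Int) (v : Int) : List Int := (insertDesc top v).take 3

-- loop body of B's for-loop over (top, acc)
def stepB (s : List Int × Int) (c : String) : List Int × Int :=
  if c ≠ "" then (s.1, s.2 + (PySem.Int.ofStr? c).getD 0)
  else (pushTop s.1 s.2, 0)

def solve_alt (data : List String) : Int × Int :=
  let st : List Int × Int := data.foldl stepB ([], 0)
  let top := pushTop st.1 st.2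
  (top.headD 0, top.sum)

-- ===== PRECONDITION & SPEC =====
-- Pre_ excludes exactly the inputs where A raises ValueError: a truthy (non-empty) string
-- that int() does not accept.
def Pre_solve (data : List String) : Prop :=
  ∀ s ∈ data, s ≠ "" → (PySem.Int.ofStr? s).isSome
instance (data : List String) : Decidable (Pre_solve data) := by unfold Pre_solve; infer_instance
def pvWitness_solve : List String := ["100", "200", "", "300"]

def Spec_solve (data : List String) (out : Int × Int) : Prop := out = solve_alt data
instance (data : List String) (out : Int × Int) : Decidable (Spec_solve data out) := by unfold Spec_solve; infer_instance

-- ===== CLAIM (what is proved, stated in full; the proofs are below) =====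
def Claim_equal_solve : Prop := ∀ (data : List String), Dom_solve data → Pre_solve data → Spec_solve data (solve data)

-- ===== LEMMAS AND PROOFS =====

-- the list of per-elf totals produced by scanning `data` with running total `a`
def totals : List String → Int → List Int
  | [], a => [a]
  | c :: r, a => if c ≠ "" then totals r (a + (PySem.Int.ofStr? c).getD 0) else a :: totals r 0

def sortedDesc (s : List Int) : List Int := (PySem.List.sorted s (fun x => x) false).reverse

def topOf (s : List Int) : List Int := (sortedDesc s).take 3

theorem totals_ne_nil (data : List String) (a : Int) : totals data a ≠ [] := by
  induction data generalizing a with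
  | nil => simp [totals]
  | cons c r ih => by_cases h : c = "" <;> simp [totals, h, ih]

-- A's fold, characterised through `totals`
theorem foldA_map_sum (data : List String) :
    ∀ (ys : List (List Int)) (y : List Int),
    (data.foldl stepA (ys ++ [y])).map (fun i => i.sum)
    = ys.map (fun i => i.sum) ++ totals data y.sum := by
  induction data with
  | nil => intro ys y; simp [totals]
  | cons c r ih =>
    intro ys y
    rw [List.foldl_cons]
    by_cases h : c = ""
    · have hstep : stepA (ys ++ [y]) c = (ys ++ [y]) ++ [[]] := by simp [stepA, h]
      rw [hstep, ih (ys ++ [y]) []]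
      simp [h, totals, List.append_assoc]
    · have hstep : stepA (ys ++ [y]) c = ys ++ [y ++ [(PySem.Int.ofStr? c).getD 0]] := by
        simp [stepA, h]
      rw [hstep, ih ys (y ++ [(PySem.Int.ofStr? c).getD 0])]
      simp [h, totals]

-- B's fold, characterised through `totals`
theorem foldB (data : List String) :
    ∀ (top : List Int) (a : Int),
    pushTop (data.foldl stepB (top, a)).1 (data.foldl stepB (top, a)).2
    = List.foldl pushTop top (totals data a) := by
  induction data with
  | nil => intro top a; simp [totals]
  | cons c r ih =>
    intro top a
    by_cases h : c = "" <;> simp [h, totals, ih, stepB]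

theorem insertDesc_perm (D : List Int) (v : Int) : (insertDesc D v).Perm (v :: D) := by
  induction D with
  | nil => simp [insertDesc]
  | cons x t ih =>
    unfold insertDesc
    split
    · exact ((ih.cons x).trans (List.Perm.swap v x t))
    · exact List.Perm.refl _

theorem insertDesc_pairwise {D : List Int} (h : D.Pairwise (fun a b => b ≤ a)) (v : Int) :
    (insertDesc D v).Pairwise (fun a b => b ≤ a) := by
  induction D with
  | nil => simp [insertDesc]
  | cons x t ih =>
    rcases List.pairwise_cons.mp h with ⟨hx, ht⟩
    unfold insertDesc
    split
    · rename_i hv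
      refine List.pairwise_cons.mpr ⟨?_, ih ht⟩
      intro y hy
      rcases List.mem_cons.mp ((insertDesc_perm t v).mem_iff.mp hy) with h' | h'
      · exact h' ▸ hv
      · exact hx y h'
    · rename_i hv
      rw [not_le] at hv
      refine List.pairwise_cons.mpr ⟨?_, h⟩
      intro y hy
      rcases List.mem_cons.mp hy with h' | h'
      · exact h' ▸ le_of_lt hv
      · exact (hx y h').trans (le_of_lt hv)

theorem desc_unique {l₁ l₂ : List Int} (hp : l₁.Perm l₂)
    (h1 : l₁.Pairwise (fun a b => b ≤ a)) (h2 : l₂.Pairwise (fun a b => b ≤ a)) : l₁ = l₂ :=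
  PySem.List.eq_of_perm_of_pairwise_le_of_injective (fun x : Int => -x) neg_injective hp
    (h1.imp (fun h => by simpa using neg_le_neg h)) (h2.imp (fun h => by simpa using neg_le_neg h))

theorem sortedDesc_pairwise (s : List Int) : (sortedDesc s).Pairwise (fun a b => b ≤ a) := by
  unfold sortedDesc
  rw [List.pairwise_reverse]
  exact PySem.List.sorted_pairwise s (fun x => x)

theorem sortedDesc_perm (s : List Int) : (sortedDesc s).Perm s :=
  (List.reverse_perm _).trans (PySem.List.sorted_perm s (fun x => x) false)

theorem insertDesc_sortedDesc (s : List Int) (v : Int) :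
    insertDesc (sortedDesc s) v = sortedDesc (v :: s) :=
  desc_unique
    ((insertDesc_perm _ v).trans (((sortedDesc_perm s).cons v).trans (sortedDesc_perm (v :: s)).symm))
    (insertDesc_pairwise (sortedDesc_pairwise s) v)
    (sortedDesc_pairwise (v :: s))

theorem take_insertDesc (D : List Int) : ∀ (k : Nat) (v : Int),
    (insertDesc (D.take k) v).take k = (insertDesc D v).take k := by
  induction D with
  | nil => intro k v; simp
  | cons x t ih =>
    intro k v
    cases k with
    | zero => simp
    | succ k =>
      simp only [List.take_succ_cons]
      unfold insertDesc
      split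
      · simp [ih k v]
      · cases k with
        | zero => simp
        | succ k => simp [List.take_take]

theorem pushTop_topOf (s : List Int) (v : Int) : pushTop (topOf s) v = topOf (v :: s) := by
  unfold pushTop topOf
  rw [take_insertDesc (sortedDesc s) 3 v, insertDesc_sortedDesc]

theorem topOf_perm {s s' : List Int} (h : s.Perm s') : topOf s = topOf s' := by
  unfold topOf sortedDesc
  rw [PySem.List.sorted_eq_sorted_of_perm s s' (fun x => x) (fun _ _ h => h) h]

theorem foldl_pushTop (T : List Int) : ∀ (s : List Int),
    List.foldl pushTop (topOf s) T = topOf (s ++ T) := by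
  induction T with
  | nil => intro s; simp
  | cons v T ih =>
    intro s
    rw [List.foldl_cons, pushTop_topOf, ih (v :: s)]
    exact topOf_perm List.perm_middle.symm

theorem sortedDesc_eq_sorted_rev (s : List Int) :
    sortedDesc s = PySem.List.sorted s (fun x => x) true :=
  desc_unique
    ((sortedDesc_perm s).trans (PySem.List.sorted_perm s (fun x => x) true).symm)
    (sortedDesc_pairwise s)
    (PySem.List.sorted_pairwise_rev s (fun x => x))

theorem max_head {T : List Int} (hT : T ≠ []) :
    (PySem.List.max? T (fun x => x)).getD 0 = (topOf T).headD 0 := by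
  obtain ⟨m, hm⟩ : ∃ m, PySem.List.max? T (fun x => x) = some m := by
    cases h : PySem.List.max? T (fun x => x) with
    | none => exact absurd ((PySem.List.max?_eq_none_iff T _).mp h) hT
    | some m => exact ⟨m, rfl⟩
  have hD : sortedDesc T ≠ [] := by
    intro h
    have := (sortedDesc_perm T).length_eq
    rw [h] at this
    exact hT (List.length_eq_zero_iff.mp this.symm)
  obtain ⟨h, t, hht⟩ : ∃ h t, sortedDesc T = h :: t := by
    cases hcase : sortedDesc T with
    | nil => exact absurd hcase hD
    | cons h t => exact ⟨h, t, rfl⟩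
  have hmem : h ∈ T := (sortedDesc_perm T).mem_iff.mp (by rw [hht]; exact List.mem_cons_self)
  have hmax : ∀ y ∈ T, y ≤ h :=
    PySem.List.key_head_sorted_rev_ge T (fun x => x) (by rw [← sortedDesc_eq_sorted_rev, hht])
  have h1 : m ≤ h := hmax m (PySem.List.max?_mem hm)
  have h2 : h ≤ m := PySem.List.max?_isMax hm h hmem
  rw [hm]
  unfold topOf
  rw [hht]
  simp [le_antisymm h1 h2]

-- ===== VERDICT (by name: the statement is the Claim_ definition above) =====
theorem solve_spec : Claim_equal_solve := by
  intro data _ _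
  unfold Spec_solve
  show solve data = solve_alt data
  have hA := foldA_map_sum data [] []
  simp only [List.map_nil, List.nil_append, List.sum_nil] at hA
  have hB' : pushTop (List.foldl stepB ([], 0) data).1 (List.foldl stepB ([], 0) data).2
      = topOf (totals data 0) :=
    (foldB data [] 0).trans (by simpa using foldl_pushTop (totals data 0) [])
  simp only [solve, solve_alt, hA, hB']
  rw [PySem.List.slice?_none_none_neg_one, Option.getD_some,
    PySem.List.slice_to _ (by norm_num)]
  rw [max_head (totals_ne_nil data 0)]
  unfold topOf sortedDesc
  rfl
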